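-- pv_equiv track=rewrite | github.com/Ryan-Reese/ailsi_iKraph | NER/pipeline_step5/refine_tag_fixGap.py | refine_tag_fixGap
-- ===== SOURCE A (Python) =====
-- def refine_tag_fixGap(input_tag, entity, gap=1):
--     '''
--     refine: 'OIB' to 'OBI', 'OBB' to 'OBI', 'OBIB' to 'OBII', 'BOI' to 'BII', 'BIOI' to 'BIII'. Here B and I are same entity type.
--      input: input_tag is a list of tags within 6 entities, e.g. ['I-ChemicalEntity', 'O', 'I-ChemicalEntity','I-ChemicalEntity','O']
--     output: refined_tag is a list of refined tags, e.g. ['B-ChemicalEntity', 'O', 'B-ChemicalEntity','I-ChemicalEntity','O']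
--     '''
--     gap=int(gap)
--     full_refined_tag = []
--     for sent in input_tag:
--         refined_tag = []
--         #entity = ['DiseaseOrPhenotypicFeature', 'ChemicalEntity', 'OrganismTaxon', 'GeneOrGeneProduct', 'SequenceVariant', 'CellLine']
--         flag = [0 for i in range (len(entity))]        # flag use to decide if asign B or I
--         for candidate in sent:
--             if candidate == 'O':    # the top candidate is "O"
--                 refined_tag.append('O')
--                 # the flag of any non-zero entity will add 1
--                 flag =  [x+1 if x!=0 else 0 for x in flag]
--             elif candidate.split('-')[0] == 'B':
--                 if flag[entity.index(candidate.split('-')[1])] != 1: # the previous position "O", assign "B"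
--                     refined_tag.append('B-'+candidate.split('-')[1])
--                     flag = [0 for j in range (len(entity))] # reset flag
--                     flag[entity.index(candidate.split('-')[1])] = 1
--                 else: # the previous position "B" or "I", assign "I"
--                     refined_tag.append('I-'+candidate.split('-')[1])
--                     flag = [0 for j in range (len(entity))] # reset flag
--                     flag[entity.index(candidate.split('-')[1])] = 1
--             elif candidate.split('-')[0] == 'I':
--                 if flag[entity.index(candidate.split('-')[1])] == 1:    # the previous position 'I' or 'B'
--                     refined_tag.append('I-'+candidate.split('-')[1])
--                 elif flag[entity.index(candidate.split('-')[1])] >gap+1:    # the gap larger than gap_cutoff, assign 'B'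
--                     refined_tag.append('B-'+candidate.split('-')[1])
--                     flag = [0 for j in range (len(entity))] # reset flag
--                     flag[entity.index(candidate.split('-')[1])] = 1
--                 elif flag[entity.index(candidate.split('-')[1])] == 0:      # this type happends first time
--                     refined_tag.append('B-'+candidate.split('-')[1])
--                     flag = [0 for j in range (len(entity))] # reset flag
--                     flag[entity.index(candidate.split('-')[1])] = 1
--                 else:
--                     for k in range (1, flag[entity.index(candidate.split('-')[1])]):    # fill the gap
--                         refined_tag[-k] = 'I-'+candidate.split('-')[1]
--                     refined_tag.append('I-'+candidate.split('-')[1])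
--                     flag = [0 for j in range (len(entity))] # reset flag
--                     flag[entity.index(candidate.split('-')[1])] = 1
--         full_refined_tag.append(refined_tag)
--     return full_refined_tag
-- ===== SOURCE B (Python) =====
-- def refine_tag_fixGap(input_tag, entity, gap=1):
--     gap = int(gap)
--     result = []
--     for sent in input_tag:
--         # stage 1: parse once; keep only tokens that produce output
--         # (None for 'O', (kind, type) for B-/I- tokens; anything else emits nothing in A)
--         kept = []
--         for c in sent:
--             if c == 'O':
--                 kept.append(None)
--             else:
--                 p = c.split('-')
--                 if p[0] == 'B' or p[0] == 'I':
--                     kept.append((p[0], p[1]))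
--         # stage 2: preallocate an all-'O' output and link consecutive entity
--         # tokens by positional distance, writing tags (and gap fills) by index
--         out = ['O'] * len(kept)
--         prev_i = prev_t = None
--         for i, tok in enumerate(kept):
--             if tok is None:
--                 continue
--             kind, t = tok
--             if prev_t == t and (i - prev_i == 1 or (kind == 'I' and i - prev_i <= gap + 1)):
--                 for j in range(prev_i + 1, i + 1):
--                     out[j] = 'I-' + t
--             else:
--                 out[i] = 'B-' + t
--             prev_i, prev_t = i, t
--         result.append(out)
--     return result
-- ===== Notes on version B (the rewrite author's own statement) =====
-- stated objective: faster
-- what changed: Replaces A's one-pass state machine over a length-E flag array (rebuilt and scanned with entity.index per token, gap-filled via negative-index writes into the growing output) by two staged passes: first parse the sentence once into (kind,type) records, then link consecutive entity records by positional distance, writing tags and gap fills by index into a preallocated all-'O' array; the entity list is never consulted.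
import Mathlib
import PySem

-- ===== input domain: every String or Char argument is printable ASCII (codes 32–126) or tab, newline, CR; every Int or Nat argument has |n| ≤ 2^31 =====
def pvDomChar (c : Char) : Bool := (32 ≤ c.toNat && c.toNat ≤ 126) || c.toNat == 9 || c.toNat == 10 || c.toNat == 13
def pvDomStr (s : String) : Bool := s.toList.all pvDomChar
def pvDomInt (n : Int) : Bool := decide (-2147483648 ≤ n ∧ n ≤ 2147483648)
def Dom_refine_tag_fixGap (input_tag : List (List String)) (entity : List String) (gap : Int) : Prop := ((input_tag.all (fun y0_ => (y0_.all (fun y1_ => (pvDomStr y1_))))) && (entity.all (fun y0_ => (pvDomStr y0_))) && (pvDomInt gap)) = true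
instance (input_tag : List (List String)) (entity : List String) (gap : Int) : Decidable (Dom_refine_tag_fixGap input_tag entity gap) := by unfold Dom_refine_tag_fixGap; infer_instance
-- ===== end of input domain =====

-- B replaces A's per-token length-E flag array and entity.index scans by two staged passes
-- (parse to records, then link consecutive records by positional distance into a preallocated
-- array); equivalence proved on Pre_ (inputs where A raises no exception).


-- ===== PORT A =====
-- candidate.split('-') (split? is none only for the empty separator, so getD never fires)
def partsOf (c : String) : List String := (PySem.Str.split? c "-").getD []

-- one token of A's inner loop over the state (refined_tag, flag)
def stepA (entity : List String) (gap : Int) (st : List String × List Int) (candidate : String) : List String × List Int :=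
  let refined := st.1
  let flag := st.2
  if candidate = "O" then
    (refined ++ ["O"], flag.map (fun x => if x ≠ 0 then x + 1 else 0))
  else
    let parts := partsOf candidate
    let head := (PySem.List.pyGet? parts 0).getD ""
    if head = "B" then
      match PySem.List.pyGet? parts 1 with
    | none => st            -- Python raises IndexError here; excluded by Pre_
    | some t =>
      match PySem.List.index? entity t with
      | none => st          -- Python raises ValueError here; excluded by Pre_
      | some idx =>
        let f := (PySem.List.pyGet? flag (idx : Int)).getD 0
        let tag := if f ≠ 1 then "B-" ++ t else "I-" ++ t
        (refined ++ [tag], (List.replicate entity.length (0 : Int)).set idx 1)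
    else if head = "I" then
      match PySem.List.pyGet? parts 1 with
      | none => st            -- Python raises IndexError here; excluded by Pre_
      | some t =>
        match PySem.List.index? entity t with
        | none => st          -- Python raises ValueError here; excluded by Pre_
        | some idx =>
          let f := (PySem.List.pyGet? flag (idx : Int)).getD 0
          if f = 1 then (refined ++ ["I-" ++ t], flag)
          else if f > gap + 1 then
            (refined ++ ["B-" ++ t], (List.replicate entity.length (0 : Int)).set idx 1)
          else if f = 0 then
            (refined ++ ["B-" ++ t], (List.replicate entity.length (0 : Int)).set idx 1)
          else
            let refined' := (PySem.List.pyRange 1 f 1).foldl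
              (fun r k => PySem.List.pySetD r (-k) ("I-" ++ t)) refined
            (refined' ++ ["I-" ++ t], (List.replicate entity.length (0 : Int)).set idx 1)
    else st

def refine_tag_fixGap (input_tag : List (List String)) (entity : List String) (gap : Int) : List (List String) :=
  input_tag.foldl
    (fun full sent =>
      full ++ [(sent.foldl (stepA entity gap) ([], List.replicate entity.length (0 : Int))).1])
    []

-- ===== PORT B =====
-- stage 1 of Source B: parse once, keeping only tokens that produce output
-- (p[1] is total here via getD: a B/I token with no '-' raises in Python and is excluded by Pre_)
def keptOf (sent : List String) : List (Option (String × String)) :=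
  sent.foldl
    (fun kept c =>
      if c = "O" then kept ++ [none]
      else
        let p := partsOf c
        let h := (PySem.List.pyGet? p 0).getD ""
        if h = "B" ∨ h = "I" then kept ++ [some (h, (PySem.List.pyGet? p 1).getD "")]
        else kept)
    []

-- stage 2 of Source B: one enumerated record; state = (out array, prev = last (index, type))
def stepB (gap : Int) (st : List String × Option (Int × String)) (itok : Int × Option (String × String)) : List String × Option (Int × String) :=
  match itok.2 with
  | none => st
  | some (kind, t) =>
    let link : Bool :=
      match st.2 with
      | none => false
      | some (p, u) =>
        decide (u = t) && (decide (itok.1 - p = 1) || (decide (kind = "I") && decide (itok.1 - p ≤ gap + 1)))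
    let p := (st.2.map Prod.fst).getD 0
    if link then
      ((PySem.List.pyRange (p + 1) (itok.1 + 1) 1).foldl
        (fun r j => PySem.List.pySetD r j ("I-" ++ t)) st.1, some (itok.1, t))
    else
      (PySem.List.pySetD st.1 itok.1 ("B-" ++ t), some (itok.1, t))

def refine_tag_fixGap_alt (input_tag : List (List String)) (entity : List String) (gap : Int) : List (List String) :=
  input_tag.foldl
    (fun res sent =>
      res ++ [((PySem.List.enumerate (keptOf sent) 0).foldl (stepB gap)
                (List.replicate (keptOf sent).length "O", none)).1])
    []

-- ===== PRECONDITION & SPEC =====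
-- Pre_ excludes exactly the inputs where A raises: a token whose first dash-field is 'B' or 'I'
-- must have a second dash-field (else IndexError) and that field must occur in entity (else
-- entity.index raises ValueError).
def Pre_refine_tag_fixGap (input_tag : List (List String)) (entity : List String) (gap : Int) : Prop :=
  ∀ sent ∈ input_tag, ∀ c ∈ sent,
    ((partsOf c).headD "" = "B" ∨ (partsOf c).headD "" = "I") →
      2 ≤ (partsOf c).length ∧ (partsOf c).getD 1 "" ∈ entity
instance (input_tag : List (List String)) (entity : List String) (gap : Int) : Decidable (Pre_refine_tag_fixGap input_tag entity gap) := by unfold Pre_refine_tag_fixGap; infer_instance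

def pvWitness_refine_tag_fixGap : List (List String) × List String × Int :=
  ([["I-X", "O", "I-X"], ["B-X", "B-X", "O"]], ["X", "Y"], 1)

def Spec_refine_tag_fixGap (input_tag : List (List String)) (entity : List String) (gap : Int) (out : List (List String)) : Prop := out = refine_tag_fixGap_alt input_tag entity gap
instance (input_tag : List (List String)) (entity : List String) (gap : Int) (out : List (List String)) : Decidable (Spec_refine_tag_fixGap input_tag entity gap out) := by unfold Spec_refine_tag_fixGap; infer_instance

-- ===== CLAIM (what is proved, stated in full; the proofs are below) =====
def Claim_equal_refine_tag_fixGap : Prop := ∀ (input_tag : List (List String)) (entity : List String) (gap : Int), Dom_refine_tag_fixGap input_tag entity gap → Pre_refine_tag_fixGap input_tag entity gap → Spec_refine_tag_fixGap input_tag entity gap (refine_tag_fixGap input_tag entity gap)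

-- ===== LEMMAS AND PROOFS =====

-- p[0] as headD
lemma head_eq (l : List String) : (PySem.List.pyGet? l 0).getD "" = l.headD "" := by
  cases l <;> simp [PySem.List.pyGet?, PySem.List.pyIdx?]

-- the parse of one token, as stage 1 of Source B performs it (none = token emits nothing)
def parseTok (c : String) : Option (Option (String × String)) :=
  if c = "O" then some none
  else
    let p := partsOf c
    let h := (PySem.List.pyGet? p 0).getD ""
    if h = "B" ∨ h = "I" then some (some (h, (PySem.List.pyGet? p 1).getD "")) else none

-- stage 1 of Source B is a filterMap by parseTok
lemma keptOf_eq (sent : List String) : keptOf sent = sent.filterMap parseTok := by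
  have hgen : ∀ (l : List String) (acc : List (Option (String × String))),
      l.foldl
        (fun kept c =>
          if c = "O" then kept ++ [none]
          else
            let p := partsOf c
            let h := (PySem.List.pyGet? p 0).getD ""
            if h = "B" ∨ h = "I" then kept ++ [some (h, (PySem.List.pyGet? p 1).getD "")]
            else kept) acc
      = acc ++ l.filterMap parseTok := by
    intro l
    induction l with
    | nil => intro acc; simp
    | cons c cs ih =>
      intro acc
      simp only [List.foldl_cons, List.filterMap_cons, parseTok]
      split_ifs with h1 h2 <;> simp [ih, parseTok]
  simpa using hgen sent []

-- A's step, rephrased on parsed records (only applied to parseTok outputs under Pre_)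
def stepA' (entity : List String) (gap : Int) (st : List String × List Int) (x : Option (String × String)) : List String × List Int :=
  match x with
  | none => (st.1 ++ ["O"], st.2.map (fun v => if v ≠ 0 then v + 1 else 0))
  | some (kind, t) =>
    match PySem.List.index? entity t with
    | none => st
    | some idx =>
      let f := (PySem.List.pyGet? st.2 (idx : Int)).getD 0
      if kind = "B" then
        (st.1 ++ [if f ≠ 1 then "B-" ++ t else "I-" ++ t], (List.replicate entity.length (0 : Int)).set idx 1)
      else
        if f = 1 then (st.1 ++ ["I-" ++ t], st.2)
        else if f > gap + 1 then (st.1 ++ ["B-" ++ t], (List.replicate entity.length (0 : Int)).set idx 1)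
        else if f = 0 then (st.1 ++ ["B-" ++ t], (List.replicate entity.length (0 : Int)).set idx 1)
        else
          ((PySem.List.pyRange 1 f 1).foldl (fun r k => PySem.List.pySetD r (-k) ("I-" ++ t)) st.1 ++ ["I-" ++ t],
           (List.replicate entity.length (0 : Int)).set idx 1)

-- the tokens Pre_ admits
def PreTok (entity : List String) (c : String) : Prop :=
  ((partsOf c).headD "" = "B" ∨ (partsOf c).headD "" = "I") →
    2 ≤ (partsOf c).length ∧ (partsOf c).getD 1 "" ∈ entity

lemma stepA_eq_parsed (entity : List String) (gap : Int) (st : List String × List Int)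
    (c : String) (hc : PreTok entity c) :
    stepA entity gap st c = match parseTok c with
      | none => st
      | some x => stepA' entity gap st x := by
  unfold stepA parseTok PreTok at *
  by_cases hO : c = "O"
  · simp [hO, stepA']
  · simp only [hO, if_neg, if_false]
    rw [head_eq] at *
    by_cases hB : (partsOf c).headD "" = "B"
    · obtain ⟨h2, hmem⟩ := hc (Or.inl hB)
      have h1lt : 1 < (partsOf c).length := h2
      have hpg : PySem.List.pyGet? (partsOf c) 1 = some (partsOf c)[1] := by
        simpa using PySem.List.pyGet?_ofNat (partsOf c) 1 h1lt
      simp only [hB, if_pos, or_true, true_or, if_true, hpg, stepA']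
      simp
    · by_cases hI : (partsOf c).headD "" = "I"
      · obtain ⟨h2, hmem⟩ := hc (Or.inr hI)
        have h1lt : 1 < (partsOf c).length := h2
        have hpg : PySem.List.pyGet? (partsOf c) 1 = some (partsOf c)[1] := by
          simpa using PySem.List.pyGet?_ofNat (partsOf c) 1 h1lt
        have hBI : (partsOf c).headD "" ≠ "B" := hB
        simp only [hI, hB, or_true, if_true, if_false, hpg, stepA']
        simp [hB]
      · have hB' : ¬(partsOf c).head?.getD "" = "B" := by
          simpa [List.headD_eq_head?_getD] using hB
        have hI' : ¬(partsOf c).head?.getD "" = "I" := by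
          simpa [List.headD_eq_head?_getD] using hI
        simp [hB', hI']

lemma foldlA_parsed (entity : List String) (gap : Int) (l : List String)
    (st : List String × List Int) (hpre : ∀ c ∈ l, PreTok entity c) :
    l.foldl (stepA entity gap) st = (l.filterMap parseTok).foldl (stepA' entity gap) st := by
  induction l generalizing st with
  | nil => rfl
  | cons c cs ih =>
    simp only [List.foldl_cons, List.filterMap_cons]
    rw [stepA_eq_parsed entity gap st c (hpre c (by simp))]
    cases hx : parseTok c with
    | none => exact ih st (fun d hd => hpre d (by simp [hd]))
    | some x =>
      simp only [List.foldl_cons]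
      exact ih _ (fun d hd => hpre d (by simp [hd]))

-- distinct entity types have distinct first indices
lemma index?_inj {entity : List String} {t u : String} {i j : Nat}
    (ht : PySem.List.index? entity t = some i) (hu : PySem.List.index? entity u = some j)
    (hij : i = j) : t = u := by
  obtain ⟨hi, hti, -⟩ := PySem.List.getElem_of_index?_eq_some ht
  obtain ⟨hj, huj, -⟩ := PySem.List.getElem_of_index?_eq_some hu
  subst hij; rw [← hti, ← huj]

-- flag lookup on A's reset-and-set shape
lemma flag_lookup (E : Nat) (j idx : Nat) (m : Int) (hidx : idx < E) :
    (PySem.List.pyGet? (((List.replicate E (0:Int)).set j m)) (idx : Int)).getD 0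
      = if j = idx then m else 0 := by
  rw [PySem.List.pyGet?_natCast, List.getElem?_set]
  by_cases h1 : j = idx
  · subst h1
    rw [if_pos rfl, if_pos (by simpa using hidx)]
    simp
  · rw [if_neg h1, List.getElem?_replicate, if_pos hidx]
    simp [h1]

lemma flag_lookup0 (E : Nat) (idx : Nat) (hidx : idx < E) :
    (PySem.List.pyGet? (List.replicate E (0:Int)) (idx : Int)).getD 0 = 0 := by
  rw [PySem.List.pyGet?_natCast]
  rw [List.getElem?_replicate]; simp [hidx]

lemma pySetD_neg (r : List String) (k : Nat) (v : String) (h1 : 0 < k) (h2 : k ≤ r.length) :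
    PySem.List.pySetD r (-(k:Int)) v = r.set (r.length - k) v := by
  have h3 : -(r.length:Int) ≤ -(k:Int) := by omega
  have h4 : k ≠ 0 := by omega
  simp [PySem.List.pySetD, PySem.List.pySet?, PySem.List.pyIdx?, h3, h4]

-- A's gap-filling loop 'for k in range(1, 1+cnt): refined[-k] = v' rewrites the last cnt entries
lemma foldl_setNeg (v : String) (cnt : Nat) (refined : List String) (h : cnt ≤ refined.length) :
    (PySem.List.pyRange 1 (1 + (cnt:Int)) 1).foldl (fun r k => PySem.List.pySetD r (-k) v) refined
      = refined.take (refined.length - cnt) ++ List.replicate cnt v := by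
  induction cnt with
  | zero => simp [PySem.List.pyRange]
  | succ n ih =>
    have hsplit : PySem.List.pyRange 1 (1 + ((n+1:Nat):Int)) 1 =
        PySem.List.pyRange 1 (1 + (n:Int)) 1 ++ [1 + (n:Int)] := by
      rw [PySem.List.pyRange_one_append 1 (1 + (n:Int)) (1 + ((n+1:Nat):Int)) (by omega) (by push_cast; omega)]
      congr 1
      rw [PySem.List.pyRange_one_cons (by push_cast; omega)]
      have : (1 + (n:Int)) + 1 = 1 + ((n+1:Nat):Int) := by push_cast; omega
      rw [this]
      simp [PySem.List.pyRange]
    rw [hsplit, List.foldl_append, ih (by omega)]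
    simp only [List.foldl_cons, List.foldl_nil]
    have hneg : -(1 + (n:Int)) = -(((n+1:Nat)):Int) := by push_cast; omega
    rw [hneg, pySetD_neg _ (n+1) v (by omega)
      (by simp [List.length_append, List.length_take, List.length_replicate]; omega)]
    have hlen : (refined.take (refined.length - n) ++ List.replicate n v).length = refined.length := by
      simp; omega
    rw [hlen]
    have hlt : refined.length - (n+1) < (refined.take (refined.length - n)).length := by
      simp; omega
    rw [List.set_append_left _ _ hlt]
    have htk : (refined.take (refined.length - n)).set (refined.length - (n+1)) v
        = refined.take (refined.length - (n+1)) ++ [v] := by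
      have hm : refined.length - n = (refined.length - (n+1)) + 1 := by omega
      have hg : refined.length - (n+1) < refined.length := by omega
      rw [hm, List.take_add_one, List.getElem?_eq_getElem hg]
      have hlen2 : (refined.take (refined.length - (n+1))).length = refined.length - (n+1) := by
        simp
      rw [List.set_append_right _ _ (by omega), hlen2]
      simp
    rw [htk, List.append_assoc]
    simp [List.replicate_succ]

-- B's gap-filling loop 'for j in range(a, b): out[j] = v' rewrites the segment [a, b)
lemma foldl_setRange (v : String) (L : List String) (a b : Nat) (hab : a ≤ b) (hb : b ≤ L.length) :
    (PySem.List.pyRange (a:Int) (b:Int) 1).foldl (fun r j => PySem.List.pySetD r j v) L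
      = L.take a ++ List.replicate (b - a) v ++ L.drop b := by
  induction b, hab using Nat.le_induction with
  | base =>
    rw [PySem.List.pyRange_one_eq_nil (by omega)]
    simp
  | succ b hab ih =>
    have hcast : ((b+1:Nat):Int) = (b:Int) + 1 := by push_cast; ring
    rw [hcast, PySem.List.pyRange_one_succ_right (by omega), List.foldl_append,
      ih (by omega)]
    simp only [List.foldl_cons, List.foldl_nil]
    rw [PySem.List.pySetD_natCast]
    have hlen1 : (L.take a ++ List.replicate (b - a) v).length = b := by simp; omega
    rw [List.set_append_right _ _ hlen1.le, hlen1,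
      Nat.sub_self, List.drop_eq_getElem_cons (by omega : b < L.length)]
    simp only [List.set_cons_zero]
    rw [List.append_assoc]
    have : List.replicate (b - a) v ++ v :: L.drop (b + 1)
        = (List.replicate (b + 1 - a) v ++ L.drop (b + 1)) := by
      have hba : b + 1 - a = (b - a) + 1 := by omega
      rw [hba, List.replicate_succ']
      simp
    rw [this, ← List.append_assoc]

-- the invariant tying A's (refined, flag) to B's (out array, prev record) after i records
def InvB (entity : List String) (n i : Nat) (stA : List String × List Int)
    (stB : List String × Option (Int × String)) : Prop :=
  stA.1.length = i ∧ stB.1 = stA.1 ++ List.replicate (n - i) "O" ∧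
  (match stB.2 with
   | none => stA.2 = List.replicate entity.length (0:Int)
   | some (p, t) => ∃ idx, PySem.List.index? entity t = some idx ∧
       stA.2 = (List.replicate entity.length (0:Int)).set idx ((i:Int) - p) ∧ 0 ≤ p ∧ p < (i:Int))

-- writing at the first 'O' after the emitted prefix
lemma set_at_end (refA : List String) (m : Nat) (v : String) (hm : 0 < m) :
    (refA ++ List.replicate m "O").set refA.length v
      = (refA ++ [v]) ++ List.replicate (m - 1) "O" := by
  rw [List.set_append_right _ _ le_rfl, Nat.sub_self]
  cases m with
  | zero => omega
  | succ k => simp [List.replicate_succ]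

lemma step_inv (entity : List String) (gap : Int) (n i : Nat) (x : Option (String × String))
    (stA : List String × List Int) (stB : List String × Option (Int × String))
    (hi : i < n) (hInv : InvB entity n i stA stB)
    (hx : ∀ kind t, x = some (kind, t) → (kind = "B" ∨ kind = "I") ∧ t ∈ entity) :
    InvB entity n (i+1) (stepA' entity gap stA x) (stepB gap stB ((i:Int), x)) := by
  obtain ⟨refA, flagA⟩ := stA
  obtain ⟨outB, prev⟩ := stB
  obtain ⟨hlen, hout, hprev⟩ := hInv
  simp only at hlen hout hprev
  subst hout
  have hrep : n - i = (n - (i+1)) + 1 := by omega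
  cases x with
  | none =>
    simp only [stepA', stepB]
    refine ⟨by simp [hlen], ?_, ?_⟩
    · rw [hrep, List.replicate_succ]
      simp
    · cases prev with
      | none =>
        simp only at hprev
        subst hprev
        simp
      | some pt =>
        obtain ⟨p, t⟩ := pt
        obtain ⟨idx, hidx, hfl, hp0, hpi⟩ := hprev
        subst hfl
        refine ⟨idx, hidx, ?_, by omega, by push_cast; omega⟩
        rw [List.map_set, List.map_replicate]
        have h1 : ¬ ((i:Int) - p = 0) := by omega
        simp only [ne_eq, h1, not_false_eq_true, if_true, if_neg (by omega : ¬ ¬ (0:Int) = 0)]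
        congr 1
        push_cast
        ring
  | some kt =>
    obtain ⟨kind, t⟩ := kt
    obtain ⟨hkind, hmem⟩ := hx kind t rfl
    cases hix : PySem.List.index? entity t with
    | none => exact absurd hmem (by rwa [PySem.List.index?_eq_none_iff] at hix)
    | some idx =>
      obtain ⟨hidxE, -, -⟩ := PySem.List.getElem_of_index?_eq_some hix
      simp only [stepA', stepB, hix]
      cases prev with
      | none =>
        simp only at hprev
        subst hprev
        rw [flag_lookup0 _ _ hidxE]
        have hstep : (match (none : Option (Int × String)) with
            | none => false
            | some (p, u) => decide (u = t) && (decide ((i:Int) - p = 1) || (decide (kind = "I") && decide ((i:Int) - p ≤ gap + 1)))) = false := rfl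
        simp only [hstep, Bool.false_eq_true, if_false, Option.map_none, Option.getD_none]
        have key : InvB entity n (i+1) (refA ++ ["B-" ++ t], (List.replicate entity.length (0:Int)).set idx 1)
            (PySem.List.pySetD (refA ++ List.replicate (n - i) "O") ((i:Int)) ("B-" ++ t), some ((i:Int), t)) := by
          refine ⟨by simp [hlen], ?_, idx, hix, by push_cast; simp, by omega, by push_cast; omega⟩
          rw [PySem.List.pySetD_natCast, ← hlen, set_at_end _ _ _ (by omega)]
          simp [Nat.sub_sub]
        rcases hkind with h | h <;> subst h
        · simpa using key
        · simpa [ite_self] using key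
      | some pt =>
        obtain ⟨p, u⟩ := pt
        obtain ⟨ju, hju, hfl, hp0, hpi⟩ := hprev
        obtain ⟨hjuE, -, -⟩ := PySem.List.getElem_of_index?_eq_some hju
        subst hfl
        rw [flag_lookup _ _ _ _ hidxE]
        dsimp only
        by_cases hut : u = t
        · subst hut
          have hji : ju = idx := Option.some.inj (hju.symm.trans hix)
          subst hji
          rw [if_pos rfl]
          -- the previous record has the same type; f = i - p
          by_cases h1 : (i:Int) - p = 1
          · -- adjacent: both sides emit 'I-'+t and the state re-anchors at i
            have hlink : (decide (u = u) && (decide ((i:Int) - p = 1) || (decide (kind = "I") && decide ((i:Int) - p ≤ gap + 1)))) = true := by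
              simp [h1]
            simp only [hlink, if_true, Option.map_some, Option.getD_some]
            have hsing : PySem.List.pyRange (p + 1) ((i:Int) + 1) 1 = [(i:Int)] := by
              have hpi1 : p + 1 = (i:Int) := by omega
              rw [hpi1]
              exact PySem.List.pyRange_one_singleton _
            rw [hsing]
            simp only [List.foldl_cons, List.foldl_nil]
            have key : InvB entity n (i+1) (refA ++ ["I-" ++ u], (List.replicate entity.length (0:Int)).set ju 1)
                (PySem.List.pySetD (refA ++ List.replicate (n - i) "O") ((i:Int)) ("I-" ++ u), some ((i:Int), u)) := by
              refine ⟨by simp [hlen], ?_, ju, hix, by push_cast; simp, by omega, by push_cast; omega⟩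
              rw [PySem.List.pySetD_natCast, ← hlen, set_at_end _ _ _ (by omega)]
              simp [Nat.sub_sub]
            rcases hkind with h | h <;> subst h
            · simpa [h1] using key
            · simpa [h1] using key
          · rcases hkind with h | h <;> subst h
            · -- a 'B' record after a non-adjacent same-type record: both emit 'B-'+t
              have hlink : (decide (u = u) && (decide ((i:Int) - p = 1) || (decide (("B":String) = "I") && decide ((i:Int) - p ≤ gap + 1)))) = false := by
                simp [h1]
              simp only [hlink, Bool.false_eq_true, if_false]
              have key : InvB entity n (i+1) (refA ++ ["B-" ++ u], (List.replicate entity.length (0:Int)).set ju 1)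
                  (PySem.List.pySetD (refA ++ List.replicate (n - i) "O") ((i:Int)) ("B-" ++ u), some ((i:Int), u)) := by
                refine ⟨by simp [hlen], ?_, ju, hix, by push_cast; simp, by omega, by push_cast; omega⟩
                rw [PySem.List.pySetD_natCast, ← hlen, set_at_end _ _ _ (by omega)]
                simp [Nat.sub_sub]
              simpa [h1] using key
            · by_cases h2 : (i:Int) - p > gap + 1
              · -- the gap exceeds the cutoff: both start a fresh entity with 'B-'+t
                have hle : ¬ ((i:Int) - p ≤ gap + 1) := by omega
                have key : InvB entity n (i+1) (refA ++ ["B-" ++ u], (List.replicate entity.length (0:Int)).set ju 1)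
                    (PySem.List.pySetD (refA ++ List.replicate (n - i) "O") ((i:Int)) ("B-" ++ u), some ((i:Int), u)) := by
                  refine ⟨by simp [hlen], ?_, ju, hix, by push_cast; simp, by omega, by push_cast; omega⟩
                  rw [PySem.List.pySetD_natCast, ← hlen, set_at_end _ _ _ (by omega)]
                  simp [Nat.sub_sub]
                simpa [h1, h2, hle] using key
              · -- the gap fill: A rewrites the last entries backwards, B writes the segment forwards
                have hle : (i:Int) - p ≤ gap + 1 := by omega
                rw [if_pos (show (decide (u = u) && (decide ((i:Int) - p = 1) || decide (("I":String) = "I") && decide ((i:Int) - p ≤ gap + 1))) = true by simp [hle]),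
                  if_neg (by decide : ¬ (("I":String) = "B")), if_neg h1, if_neg h2,
                  if_neg (by omega : ¬ ((i:Int) - p = 0))]
                obtain ⟨pN, hp⟩ : ∃ m : Nat, p = (m:Int) := ⟨p.toNat, by omega⟩
                subst hp
                have hige : pN + 2 ≤ i := by omega
                have hf : (i:Int) - (pN:Int) = 1 + ((i - pN - 1 : Nat):Int) := by push_cast; omega
                rw [hf, foldl_setNeg ("I-" ++ u) (i - pN - 1) refA (by rw [hlen]; omega)]
                simp only [Option.map_some, Option.getD_some]
                have hc1 : (pN:Int) + 1 = ((pN+1:Nat):Int) := by push_cast; ring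
                have hc2 : (i:Int) + 1 = ((i+1:Nat):Int) := by push_cast; ring
                rw [hc1, hc2, foldl_setRange ("I-" ++ u) _ (pN+1) (i+1) (by omega) (by simp [hlen]; omega)]
                refine ⟨by simp [hlen]; omega, ?_, ju, hix, by push_cast; simp, by omega, by push_cast; omega⟩
                rw [List.take_append, List.drop_append]
                simp only [hlen]
                rw [List.take_replicate, List.drop_replicate,
                  List.drop_eq_nil_of_le (show refA.length ≤ i + 1 by rw [hlen]; omega)]
                have e1 : min (pN + 1 - i) (n - i) = 0 := by omega
                have e2 : n - i - (i + 1 - i) = n - (i + 1) := by omega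
                have ht : i - (i - pN - 1) = pN + 1 := by omega
                have hr : i + 1 - (pN + 1) = (i - pN - 1) + 1 := by omega
                rw [e1, e2, ht, hr, List.replicate_succ']
                simp [List.append_assoc]
        · have hji : ¬ (ju = idx) := fun h => hut (index?_inj hju hix h)
          rw [if_neg hji]
          have hlink : (decide (u = t) && (decide ((i:Int) - p = 1) || (decide (kind = "I") && decide ((i:Int) - p ≤ gap + 1)))) = false := by
            simp [hut]
          simp only [hlink, Bool.false_eq_true, if_false]
          have key : InvB entity n (i+1) (refA ++ ["B-" ++ t], (List.replicate entity.length (0:Int)).set idx 1)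
            (PySem.List.pySetD (refA ++ List.replicate (n - i) "O") ((i:Int)) ("B-" ++ t), some ((i:Int), t)) := by
            refine ⟨by simp [hlen], ?_, idx, hix, by push_cast; simp, by omega, by push_cast; omega⟩
            rw [PySem.List.pySetD_natCast, ← hlen, set_at_end _ _ _ (by omega)]
            simp [Nat.sub_sub]
          rcases hkind with h | h <;> subst h
          · simpa using key
          · simpa [ite_self] using key

lemma suffix_inv (entity : List String) (gap : Int) (n : Nat)
    (rest : List (Option (String × String))) :
    ∀ (i : Nat) (stA : List String × List Int) (stB : List String × Option (Int × String)),
      i + rest.length = n → InvB entity n i stA stB →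
      (∀ x ∈ rest, ∀ kind t, x = some (kind, t) → (kind = "B" ∨ kind = "I") ∧ t ∈ entity) →
      InvB entity n n (rest.foldl (stepA' entity gap) stA)
        ((PySem.List.enumerate rest (i:Int)).foldl (stepB gap) stB) := by
  induction rest with
  | nil =>
    intro i stA stB hn hInv _
    simp only [List.length_nil, Nat.add_zero] at hn
    subst hn
    simpa [PySem.List.enumerate] using hInv
  | cons x xs ih =>
    intro i stA stB hn hInv hok
    rw [PySem.List.enumerate_cons]
    simp only [List.foldl_cons]
    have hcast : (i:Int) + 1 = ((i+1:Nat):Int) := by push_cast; ring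
    rw [hcast]
    exact ih (i+1) _ _ (by simp at hn ⊢; omega)
      (step_inv entity gap n i x stA stB (by simp at hn; omega) hInv
        (hx := fun kind t hxt => hok x (by simp) kind t hxt))
      (fun y hy => hok y (by simp [hy]))

-- parsed records under Pre_ carry a B/I kind and a known entity type
lemma parse_ok (entity : List String) (sent : List String)
    (hpre : ∀ c ∈ sent, PreTok entity c) :
    ∀ x ∈ sent.filterMap parseTok, ∀ kind t, x = some (kind, t) →
      (kind = "B" ∨ kind = "I") ∧ t ∈ entity := by
  intro x hx kind t hxt
  subst hxt
  obtain ⟨c, hc, hparse⟩ := List.mem_filterMap.1 hx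
  unfold parseTok at hparse
  by_cases hO : c = "O"
  · simp [hO] at hparse
  · simp only [hO, if_false] at hparse
    rw [head_eq] at hparse
    by_cases hBI : (partsOf c).headD "" = "B" ∨ (partsOf c).headD "" = "I"
    · rw [if_pos hBI] at hparse
      obtain ⟨h2, hmem⟩ := hpre c hc hBI
      have h1lt : 1 < (partsOf c).length := h2
      have hpg : PySem.List.pyGet? (partsOf c) 1 = some (partsOf c)[1] := by
        simpa using PySem.List.pyGet?_ofNat (partsOf c) 1 h1lt
      obtain ⟨hk, ht⟩ := Prod.mk.injEq .. ▸ Option.some.inj (Option.some.inj hparse)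
      subst hk ht
      have hm1 : (partsOf c)[1] ∈ entity := by
        rwa [List.getD_eq_getElem _ _ h1lt] at hmem
      refine ⟨hBI, ?_⟩
      rw [hpg]
      simpa using hm1
    · rw [if_neg hBI] at hparse
      exact absurd hparse (by simp)

-- ===== VERDICT (by name: the statement is the Claim_ definition above) =====
theorem refine_tag_fixGap_spec : Claim_equal_refine_tag_fixGap := by
  intro input_tag entity gap _ hpre
  unfold Spec_refine_tag_fixGap refine_tag_fixGap refine_tag_fixGap_alt
  rw [PySem.List.foldl_append_singleton_eq_map, PySem.List.foldl_append_singleton_eq_map]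
  apply List.map_congr_left
  intro sent hsent
  have hps : ∀ c ∈ sent, PreTok entity c := fun c hc => hpre sent hsent c hc
  rw [foldlA_parsed entity gap sent _ hps, keptOf_eq]
  set kept := sent.filterMap parseTok with hkept
  have h := suffix_inv entity gap kept.length kept 0
    ([], List.replicate entity.length 0) (List.replicate kept.length "O", none)
    (by simp) (by refine ⟨rfl, by simp, rfl⟩) (parse_ok entity sent hps)
  simp only [Nat.cast_zero] at h
  obtain ⟨hlen, hout, -⟩ := h
  rw [hout, Nat.sub_self]
  simp
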